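-- pv_equiv track=rewrite | github.com/augustoerico/muskit | QuantumSoftwareTestingTools/Muskit/resultsAnalyzer/results_accumulator.py | accumulate_results
-- ===== SOURCE A (Python) =====
-- from typing import List
--
-- def accumulate_results(
--         observed_outputs_counts: dict,
--         qubits_ids: List[int]
--         ) -> dict:
--     """
--     accumulates results for measured qubits
--     """
--     results_accumulator = {}
--     for observed_output, count in observed_outputs_counts.items():
--         measured_qubits = get_measured_qubits(
--             observed_output, qubits_ids)
--         if measured_qubits in results_accumulator:
--             results_accumulator[measured_qubits] += count
--         else:
--             results_accumulator[measured_qubits] = count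
--     return results_accumulator
--
-- def get_measured_qubits(
--         observed_output: str,
--         qubits_ids: List[int]) -> str:
--     """
--     get measured qubits from observed output
--     """
--     measured_qubits = ''
--     qubits = list(observed_output)
--     for qubit_id in qubits_ids:
--         measured_qubits += qubits[qubit_id]
--     return measured_qubits
-- ===== SOURCE B (Python) =====
-- def accumulate_results(observed_outputs_counts, qubits_ids):
--     """
--     accumulates results for measured qubits
--
--     Different decomposition: build the projected (key, count) pairs once,
--     then produce the result per distinct key (first-occurrence order) by
--     summing the counts that carry that key.
--     """
--     pairs = [(''.join([list(observed_output)[qubit_id]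
--                        for qubit_id in qubits_ids]), count)
--              for observed_output, count in observed_outputs_counts.items()]
--     return {key: sum(c for k, c in pairs if k == key)
--             for key in dict.fromkeys(k for k, _ in pairs)}
-- ===== Notes on version B (the rewrite author's own statement) =====
-- stated objective: alternative
-- what changed: Replaced the single hash-accumulation loop (membership test + in-place add per entry) by a two-phase group-by: first materialise the projected (key,count) pair list, then build the result per distinct key (dict.fromkeys first-occurrence order) by summing the matching counts.
import Mathlib
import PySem

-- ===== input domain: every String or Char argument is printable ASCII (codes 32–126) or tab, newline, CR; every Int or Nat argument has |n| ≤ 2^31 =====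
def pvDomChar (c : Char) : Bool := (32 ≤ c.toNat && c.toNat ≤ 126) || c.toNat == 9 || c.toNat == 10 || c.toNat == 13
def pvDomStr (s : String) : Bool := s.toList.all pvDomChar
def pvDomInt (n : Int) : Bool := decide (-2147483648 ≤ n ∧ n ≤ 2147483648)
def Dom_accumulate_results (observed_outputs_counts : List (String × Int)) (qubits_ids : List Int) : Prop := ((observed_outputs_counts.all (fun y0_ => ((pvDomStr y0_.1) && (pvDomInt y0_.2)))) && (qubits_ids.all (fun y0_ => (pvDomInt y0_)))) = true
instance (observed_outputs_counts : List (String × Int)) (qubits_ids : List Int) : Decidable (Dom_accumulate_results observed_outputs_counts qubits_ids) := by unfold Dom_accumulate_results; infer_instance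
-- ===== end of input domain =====

-- B changes the decomposition (pair list + per-distinct-key sums instead of one hash-accumulation loop); return value proved equal under Pre_.

-- ===== PORT A =====
def get_measured_qubits (observed_output : String) (qubits_ids : List Int) : String :=
  -- measured_qubits += qubits[qubit_id], exact under Pre_ (pyGetD in range)
  String.ofList (qubits_ids.foldl
    (fun measured_qubits qubit_id =>
      measured_qubits ++ [PySem.List.pyGetD observed_output.toList qubit_id ' ']) [])

def accumulate_results (observed_outputs_counts : List (String × Int)) (qubits_ids : List Int) : List (String × Int) :=
  (observed_outputs_counts.foldl
    (fun results_accumulator p =>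
      let measured_qubits := get_measured_qubits p.1 qubits_ids
      match results_accumulator.get? measured_qubits with
      | some v => results_accumulator.insert measured_qubits (v + p.2)
      | none => results_accumulator.insert measured_qubits p.2)
    (PySem.Dict.empty : PySem.Dict String Int)).items

-- ===== PORT B =====
def alt_key (observed_output : String) (qubits_ids : List Int) : String :=
  -- ''.join([list(observed_output)[qubit_id] for qubit_id in qubits_ids])
  String.ofList (qubits_ids.map (fun qubit_id => PySem.List.pyGetD observed_output.toList qubit_id ' '))

def accumulate_results_alt (observed_outputs_counts : List (String × Int)) (qubits_ids : List Int) : List (String × Int) :=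
  let pairs := observed_outputs_counts.map (fun p => (alt_key p.1 qubits_ids, p.2))
  (PySem.List.dedup (pairs.map Prod.fst)).map
    (fun key => (key, ((pairs.filter (fun p => p.1 == key)).map Prod.snd).sum))

-- ===== PRECONDITION & SPEC =====
-- Pre_ excludes exactly the inputs where A raises IndexError: some qubit id out of range for some output string.
def Pre_accumulate_results (observed_outputs_counts : List (String × Int)) (qubits_ids : List Int) : Prop :=
  ∀ p ∈ observed_outputs_counts, ∀ i ∈ qubits_ids, PySem.Raise.InRange p.1.toList.length i
instance (observed_outputs_counts : List (String × Int)) (qubits_ids : List Int) : Decidable (Pre_accumulate_results observed_outputs_counts qubits_ids) := by unfold Pre_accumulate_results; infer_instance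

def pvWitness_accumulate_results : (List (String × Int)) × List Int := ([("01", 3), ("11", 2), ("00", 1)], [0])

def Spec_accumulate_results (observed_outputs_counts : List (String × Int)) (qubits_ids : List Int) (out : List (String × Int)) : Prop := out = accumulate_results_alt observed_outputs_counts qubits_ids
instance (observed_outputs_counts : List (String × Int)) (qubits_ids : List Int) (out : List (String × Int)) : Decidable (Spec_accumulate_results observed_outputs_counts qubits_ids out) := by unfold Spec_accumulate_results; infer_instance

-- ===== CLAIM (what is proved, stated in full; the proofs are below) =====
def Claim_equal_accumulate_results : Prop := ∀ (observed_outputs_counts : List (String × Int)) (qubits_ids : List Int), Dom_accumulate_results observed_outputs_counts qubits_ids → Pre_accumulate_results observed_outputs_counts qubits_ids → Spec_accumulate_results observed_outputs_counts qubits_ids (accumulate_results observed_outputs_counts qubits_ids)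

-- ===== LEMMAS AND PROOFS =====

-- the two key builders agree (string-append loop vs map)
theorem key_eq (o : String) (ids : List Int) : get_measured_qubits o ids = alt_key o ids := by
  simp only [get_measured_qubits, alt_key, PySem.List.foldl_append_singleton_eq_map,
    List.nil_append]

-- A's loop body, rewritten to the shape 'd.insert (key p) (value d p)'
theorem step_eq (d : PySem.Dict String Int) (p : String × Int) (ids : List Int) :
    (let k := get_measured_qubits p.1 ids
     match d.get? k with
     | some v => d.insert k (v + p.2)
     | none => d.insert k p.2)
    = d.insert (alt_key p.1 ids)
        (match d.get? (alt_key p.1 ids) with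
         | some v => v + p.2
         | none => p.2) := by
  rw [key_eq]
  cases h : d.get? (alt_key p.1 ids) <;> simp [h]

-- value invariant of A's accumulation loop
theorem loop_getD (ids : List Int) (l : List (String × Int)) (d : PySem.Dict String Int) (k : String) :
    (l.foldl (fun d p =>
        d.insert (alt_key p.1 ids)
          (match d.get? (alt_key p.1 ids) with
           | some v => v + p.2
           | none => p.2)) d).getD k 0
      = d.getD k 0 + ((l.filter (fun p => alt_key p.1 ids == k)).map Prod.snd).sum := by
  induction l generalizing d with
  | nil => simp
  | cons p t ih =>
    simp only [List.foldl_cons, ih, List.filter_cons]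
    by_cases hk : alt_key p.1 ids = k
    · subst hk
      cases h : d.get? (alt_key p.1 ids) with
      | some v =>
        simp [h, PySem.Dict.getD_eq_get?_getD]
        ring
      | none =>
        simp [h, PySem.Dict.getD_eq_get?_getD]
    · have hne : k ≠ alt_key p.1 ids := fun h => hk h.symm
      simp [PySem.Dict.getD_insert, hne, hk]

-- ===== VERDICT (by name: the statement is the Claim_ definition above) =====
theorem accumulate_results_spec : Claim_equal_accumulate_results := by
  intro l ids _ _
  unfold Spec_accumulate_results accumulate_results accumulate_results_alt
  have hstep : (fun (d : PySem.Dict String Int) (p : String × Int) =>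
      let measured_qubits := get_measured_qubits p.1 ids
      match d.get? measured_qubits with
      | some v => d.insert measured_qubits (v + p.2)
      | none => d.insert measured_qubits p.2)
    = (fun d p => d.insert (alt_key p.1 ids)
        (match d.get? (alt_key p.1 ids) with
         | some v => v + p.2
         | none => p.2)) := by
    funext d p; exact step_eq d p ids
  rw [hstep]
  set D := l.foldl (fun d p => d.insert (alt_key p.1 ids)
        (match d.get? (alt_key p.1 ids) with
         | some v => v + p.2
         | none => p.2)) PySem.Dict.empty with hD
  have hnd : D.keys.Nodup := by
    rw [hD]
    exact PySem.Dict.nodup_keys_foldl_insert_key l (fun p => alt_key p.1 ids) _ _ PySem.Dict.nodup_keys_empty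
  have hkeys : D.keys = PySem.List.dedup (l.map (fun p => alt_key p.1 ids)) := by
    rw [hD, PySem.Dict.keys_foldl_insert_key]
    simp [PySem.Dict.keys_empty, PySem.Set.update_nil_left]
  rw [PySem.Dict.items_eq_map_keys D hnd 0, hkeys]
  simp only [List.map_map, List.filter_map, PySem.List.dedup]
  apply List.map_congr_left
  intro k _
  rw [hD, loop_getD]
  simp [Function.comp_def]
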